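-- pv_equiv track=rewrite | github.com/Massy100/AlgebraLineal | Codificador/main.py | reordenar
-- ===== SOURCE A (Python) =====
-- def codificar_mensaje(mensaje):
--     # Crear un diccionario para mapear cada letra a un número
--     alfabeto = "abcdefghijklmnñopqrstuvwxyz "
--     mapeo_alfabeto = {letra: str(idx + 1) for idx, letra in enumerate(alfabeto)}
--
--     # Codificar el mensaje
--     mensaje_codificado = " ".join(mapeo_alfabeto[letra] for letra in mensaje.lower() if letra in mapeo_alfabeto)
--
--     return mensaje_codificado
--
-- def reordenar(mensaje):
--     # Usar el resultado de codificar_mensaje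
--     mensaje_codificado = codificar_mensaje(mensaje)
--
--     # Convertir el mensaje codificado en una lista de números
--     numeros_codificados = mensaje_codificado.split()
--
--     # Calcular el número de columnas necesario para una matriz de 3 filas
--     num_columnas = -(-len(numeros_codificados) // 3)  # Redondeo hacia arriba
--
--     # Crear la matriz de 3 filas
--     matriz = [["" for _ in range(num_columnas)] for _ in range(3)]
--
--     # Rellenar la matriz con los números codificados
--     idx = 0
--     for columna in range(num_columnas):
--         for fila in range(3):
--             if idx < len(numeros_codificados):
--                 matriz[fila][columna] = numeros_codificados[idx]
--                 idx += 1
--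
--     return matriz
-- ===== SOURCE B (Python) =====
-- def reordenar(mensaje):
--     alfabeto = "abcdefghijklmnñopqrstuvwxyz "
--     # round-robin: deal each code directly into its row, cycling through the 3 rows
--     filas = [[], [], []]
--     destino = 0
--     for letra in mensaje.lower():
--         pos = alfabeto.find(letra)
--         if pos >= 0:
--             filas[destino].append(str(pos + 1))
--             destino = (destino + 1) % 3
--     # row 0 always gets the most elements: its length is the matrix width
--     ancho = len(filas[0])
--     return [fila + [""] * (ancho - len(fila)) for fila in filas]
-- ===== Notes on version B (the rewrite author's own statement) =====
-- stated objective: alternative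
-- what changed: B replaces A's encode-to-string/join/split pipeline and its column-major fill of a pre-allocated 3xN matrix via a running index by a single pass over the message that deals each code round-robin into three growing row lists (cycling destination row), then pads rows 1 and 2 to row 0's length.
import Mathlib
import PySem

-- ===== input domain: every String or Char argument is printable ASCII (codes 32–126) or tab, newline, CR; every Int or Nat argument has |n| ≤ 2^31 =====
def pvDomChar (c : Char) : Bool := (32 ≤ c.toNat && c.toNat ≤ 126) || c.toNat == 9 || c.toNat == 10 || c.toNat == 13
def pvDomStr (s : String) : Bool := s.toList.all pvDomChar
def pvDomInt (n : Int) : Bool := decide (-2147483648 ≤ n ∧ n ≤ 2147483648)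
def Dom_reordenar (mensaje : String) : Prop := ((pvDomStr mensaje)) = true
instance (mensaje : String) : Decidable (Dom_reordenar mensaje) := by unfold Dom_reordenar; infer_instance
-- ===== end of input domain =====

-- B replaces A's join/split round-trip and column-major fill of a pre-allocated matrix by a
-- single pass that deals each code round-robin into three row lists, then pads rows 1 and 2;
-- objective: alternative decomposition, same asymptotic cost.

-- ===== PORT A =====
-- the letter→number dict {letra: str(idx+1) for idx, letra in enumerate(alfabeto)} (module-level constant value)
def pvMapeo : PySem.Dict Char String :=
  (PySem.List.enumerate "abcdefghijklmnñopqrstuvwxyz ".toList 0).foldl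
    (fun d p => d.insert p.2 (PySem.Int.toStr (p.1 + 1))) PySem.Dict.empty

def codificar_mensaje (mensaje : String) : String :=
  PySem.Str.join " "
    (((PySem.Str.lower mensaje).toList.filter (fun c => pvMapeo.contains c)).map
      (fun c => pvMapeo.getD c ""))

def reordenar (mensaje : String) : List (List String) :=
  let mensaje_codificado := codificar_mensaje mensaje
  let numeros := PySem.Str.split₀ mensaje_codificado
  let num_columnas : Int := -(PySem.Int.floordiv (-(numeros.length : Int)) 3)
  let matriz : List (List String) :=
    (PySem.List.pyRange 0 3 1).map (fun _ =>
      (PySem.List.pyRange 0 num_columnas 1).map (fun _ => ""))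
  let final :=
    (PySem.List.pyRange 0 num_columnas 1).foldl (fun st columna =>
      (PySem.List.pyRange 0 3 1).foldl (fun st fila =>
        if st.2 < (numeros.length : Int) then
          (PySem.List.pySetD st.1 fila
             (PySem.List.pySetD (PySem.List.pyGetD st.1 fila []) columna
               (PySem.List.pyGetD numeros st.2 "")),
           st.2 + 1)
        else st) st)
      (matriz, (0 : Int))
  final.1

-- ===== PORT B =====
-- filas = [[],[],[]] with filas[destino].append(…) is carried as a triple of row lists
def reordenar_alt (mensaje : String) : List (List String) :=
  let alfabeto := "abcdefghijklmnñopqrstuvwxyz "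
  let final :=
    (PySem.Str.lower mensaje).toList.foldl
      (fun (st : (List String × List String × List String) × Int) letra =>
        let pos := PySem.Chars.find alfabeto.toList [letra]
        if 0 ≤ pos then
          let v := PySem.Int.toStr (pos + 1)
          let filas := st.1
          let filas' :=
            if st.2 == 0 then (filas.1 ++ [v], filas.2.1, filas.2.2)
            else if st.2 == 1 then (filas.1, filas.2.1 ++ [v], filas.2.2)
            else (filas.1, filas.2.1, filas.2.2 ++ [v])
          (filas', PySem.Int.mod (st.2 + 1) 3)
        else st)
      (([], [], []), (0 : Int))
  let filas := final.1
  let ancho := filas.1.length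
  [filas.1 ++ List.replicate (ancho - filas.1.length) "",
   filas.2.1 ++ List.replicate (ancho - filas.2.1.length) "",
   filas.2.2 ++ List.replicate (ancho - filas.2.2.length) ""]

-- ===== PRECONDITION & SPEC =====
def Spec_reordenar (mensaje : String) (out : List (List String)) : Prop := out = reordenar_alt mensaje
instance (mensaje : String) (out : List (List String)) : Decidable (Spec_reordenar mensaje out) := by unfold Spec_reordenar; infer_instance

-- ===== CLAIM (what is proved, stated in full; the proofs are below) =====
def Claim_equal_reordenar : Prop := ∀ (mensaje : String), Dom_reordenar mensaje → Spec_reordenar mensaje (reordenar mensaje)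

-- ===== LEMMAS AND PROOFS =====

-- ---- " ".join(parts).split() = parts, for nonempty whitespace-free parts ----
theorem pv_go_word (w : List Char) (hw : ∀ c ∈ w, PySem.Chars.isspace c = false) :
    ∀ (rest cur : List Char) (acc : List (List Char)),
      PySem.Chars.split₀.go (w ++ rest) cur acc = PySem.Chars.split₀.go rest (w.reverse ++ cur) acc := by
  induction w with
  | nil => intro rest cur acc; simp
  | cons c t ih =>
      intro rest cur acc
      have hc : PySem.Chars.isspace c = false := hw c (by simp)
      rw [List.cons_append, PySem.Chars.split₀.go]
      simp only [hc, Bool.false_eq_true, if_false]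
      rw [ih (fun x hx => hw x (by simp [hx])) rest (c :: cur) acc]
      simp

theorem pv_go_join (parts : List (List Char)) :
    ∀ (acc : List (List Char)),
      (∀ p ∈ parts, p ≠ [] ∧ ∀ c ∈ p, PySem.Chars.isspace c = false) →
      PySem.Chars.split₀.go (List.intercalate [' '] parts) [] acc = acc.reverse ++ parts := by
  induction parts with
  | nil => intro acc _; simp [List.intercalate]; rw [PySem.Chars.split₀.go]; simp
  | cons p t ih =>
      intro acc h
      obtain ⟨hp, hps⟩ := h p (by simp)
      have hsp : PySem.Chars.isspace ' ' = true := by decide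
      cases t with
      | nil =>
          show PySem.Chars.split₀.go (List.intercalate [' '] [p]) [] acc = _
          rw [show List.intercalate [' '] [p] = p from by simp [List.intercalate]]
          rw [← List.append_nil p, pv_go_word p hps]
          rw [PySem.Chars.split₀.go]
          simp [List.isEmpty_iff, hp]
      | cons q r =>
          have hi : List.intercalate [' '] (p :: q :: r) = p ++ ' ' :: List.intercalate [' '] (q :: r) := by
            simp [List.intercalate, List.intersperse]
          rw [hi, pv_go_word p hps]
          rw [PySem.Chars.split₀.go]
          simp only [hsp, if_true, List.append_nil, List.isEmpty_iff, List.reverse_eq_nil_iff,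
            hp, if_false, List.reverse_reverse]
          rw [ih (acc := p :: acc) (fun x hx => h x (by simp [hx]))]
          simp

theorem pv_split_join (sparts : List String)
    (h : ∀ s ∈ sparts, s.toList ≠ [] ∧ ∀ c ∈ s.toList, PySem.Chars.isspace c = false) :
    PySem.Str.split₀ (PySem.Str.join " " sparts) = sparts := by
  have h1 : (PySem.Str.split₀ (PySem.Str.join " " sparts)).map String.toList
      = sparts.map String.toList := by
    rw [PySem.Str.split₀_map_toList, PySem.Str.toList_join]
    show PySem.Chars.split₀.go (List.intercalate " ".toList (sparts.map String.toList)) [] []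
        = sparts.map String.toList
    rw [show " ".toList = [' '] from rfl]
    rw [pv_go_join (sparts.map String.toList) []
      (fun p hp => by
        obtain ⟨s, hs, rfl⟩ := List.mem_map.mp hp
        exact h s hs)]
    simp
  have hinj : Function.Injective (String.toList) := fun a b hab => String.toList_inj.mp hab
  exact List.map_injective_iff.mpr hinj h1

-- ---- every value of the letter→number dict is a nonempty whitespace-free string ----
theorem pv_vals_bool :
    pvMapeo.values.all (fun s => !s.toList.isEmpty && s.toList.all (fun c => !PySem.Chars.isspace c)) = true := by
  decide

theorem pv_keys_nodup : pvMapeo.keys.Nodup := by decide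

theorem pv_parts_ok (cs : List Char) :
    ∀ s ∈ (cs.filter (fun c => pvMapeo.contains c)).map (fun c => pvMapeo.getD c ""),
      s.toList ≠ [] ∧ ∀ c ∈ s.toList, PySem.Chars.isspace c = false := by
  intro s hs
  obtain ⟨c, hc, rfl⟩ := List.mem_map.mp hs
  have hcont : pvMapeo.contains c = true := (List.mem_filter.mp hc).2
  have hk : c ∈ pvMapeo.keys := (PySem.Dict.contains_iff_mem_keys _ _).mp hcont
  have hv : pvMapeo.getD c "" ∈ pvMapeo.values := by
    rw [PySem.Dict.values_eq_map_keys pvMapeo pv_keys_nodup ""]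
    exact List.mem_map.mpr ⟨c, hk, rfl⟩
  have := List.all_eq_true.mp pv_vals_bool _ hv
  simp only [Bool.and_eq_true, Bool.not_eq_true', List.all_eq_true] at this
  refine ⟨List.isEmpty_eq_false_iff.mp this.1, fun ch hch => ?_⟩
  simpa using this.2 ch hch

-- ---- the reshape: A's column-major fill equals the strided matrix pvMat ----
def pvCell (xs : List String) (f j : Nat) : String :=
  if 3*j+f < xs.length then xs.getD (3*j+f) "" else ""
def pvRow (xs : List String) (k f c : Nat) : List String :=
  (List.range k).map (fun j => if j < c then pvCell xs f j else "")
def pvMat (xs : List String) (k c : Nat) : List (List String) :=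
  [pvRow xs k 0 c, pvRow xs k 1 c, pvRow xs k 2 c]
def pvBody (xs : List String) (columna : Int) (st : List (List String) × Int) (fila : Int) :
    List (List String) × Int :=
  if st.2 < (xs.length : Int) then
    (PySem.List.pySetD st.1 fila
       (PySem.List.pySetD (PySem.List.pyGetD st.1 fila []) columna
         (PySem.List.pyGetD xs st.2 "")),
     st.2 + 1)
  else st

theorem pv_numcol (n : Nat) : -(PySem.Int.floordiv (-(n:Int)) 3) = (((n+2)/3 : Nat) : Int) := by
  rw [PySem.Int.floordiv, Int.fdiv_eq_ediv]
  split <;> omega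

theorem pv_row_skip (xs : List String) (k f c : Nat) (h : ¬ 3*c+f < xs.length) :
    pvRow xs k f c = pvRow xs k f (c+1) := by
  unfold pvRow
  apply List.map_congr_left
  intro j hj
  by_cases hjc : j < c
  · simp [hjc, Nat.lt_succ_of_lt hjc]
  · by_cases hje : j = c
    · subst hje
      simp [pvCell, h]
    · have : ¬ j < c + 1 := by omega
      simp [hjc, this]

theorem pv_row_set (xs : List String) (k f c : Nat) (hc : c < k) (h : 3*c+f < xs.length) :
    PySem.List.pySetD (pvRow xs k f c) ((c:Nat):Int) (PySem.List.pyGetD xs ((3*c+f : Nat):Int) "")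
      = pvRow xs k f (c+1) := by
  rw [PySem.List.pyGetD_natCast]
  have hlen : c < (pvRow xs k f c).length := by simp [pvRow, hc]
  rw [show PySem.List.pySetD (pvRow xs k f c) ((c:Nat):Int) (xs.getD (3*c+f) "")
        = (pvRow xs k f c).set c (xs.getD (3*c+f) "") from by
    simp [PySem.List.pySetD, PySem.List.pySet?, PySem.List.pyIdx?, hlen]]
  apply List.ext_getElem
  · simp [pvRow]
  intro i h1 h2
  by_cases hic : i = c
  · subst hic
    simp only [pvRow, List.getElem_set_self, List.getElem_map, List.getElem_range]
    simp [pvCell, h]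
  · rw [List.getElem_set_ne (by omega)]
    simp only [pvRow, List.getElem_map, List.getElem_range]
    by_cases hlt : i < c
    · simp [hlt, Nat.lt_succ_of_lt hlt]
    · have h2' : ¬ i < c + 1 := by omega
      simp [hlt, h2']

theorem pv_getM (a b c : List String) :
    PySem.List.pyGetD [a,b,c] (0:Int) [] = a ∧ PySem.List.pyGetD [a,b,c] (1:Int) [] = b ∧
    PySem.List.pyGetD [a,b,c] (2:Int) [] = c := by
  refine ⟨?_, ?_, ?_⟩ <;> simp [PySem.List.pyGetD, PySem.List.pyGet?, PySem.List.pyIdx?]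

theorem pv_setM (a b c v : List String) :
    PySem.List.pySetD [a,b,c] (0:Int) v = [v,b,c] ∧ PySem.List.pySetD [a,b,c] (1:Int) v = [a,v,c] ∧
    PySem.List.pySetD [a,b,c] (2:Int) v = [a,b,v] := by
  refine ⟨?_, ?_, ?_⟩ <;> simp [PySem.List.pySetD, PySem.List.pySet?, PySem.List.pyIdx?]

theorem pv_step_fila (xs : List String) (c : Nat) (hc : c < (xs.length+2)/3) (f : Nat)
    (M : List (List String)) (hM : PySem.List.pyGetD M ((f:Nat):Int) [] = pvRow xs ((xs.length+2)/3) f c)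
    (hSet : ∀ v, PySem.List.pySetD M ((f:Nat):Int) v = M.set f v)
    (hSelf : M.set f (pvRow xs ((xs.length+2)/3) f c) = M) :
    pvBody xs ((c:Nat):Int) (M, ((min (3*c+f) xs.length : Nat) : Int)) ((f:Nat):Int)
    = (M.set f (pvRow xs ((xs.length+2)/3) f (c+1)), ((min (3*c+f+1) xs.length : Nat) : Int)) := by
  by_cases h : 3*c+f < xs.length
  · rw [show ((min (3*c+f) xs.length : Nat) : Int) = ((3*c+f : Nat):Int) from by omega]
    unfold pvBody
    rw [if_pos (by push_cast; omega)]
    simp only [hM, hSet]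
    rw [pv_row_set xs _ f c hc h]
    refine congrArg₂ Prod.mk rfl (by push_cast; omega)
  · unfold pvBody
    rw [if_neg (by push_cast; omega)]
    have hskip := pv_row_skip xs ((xs.length+2)/3) f c h
    rw [← hskip, hSelf]
    refine congrArg₂ Prod.mk rfl (by push_cast; omega)

theorem pv_col_step (xs : List String) (c : Nat) (hc : c < (xs.length+2)/3) :
    (PySem.List.pyRange 0 3 1).foldl (pvBody xs ((c:Nat):Int))
      (pvMat xs ((xs.length+2)/3) c, ((min (3*c) xs.length : Nat) : Int))
    = (pvMat xs ((xs.length+2)/3) (c+1), ((min (3*(c+1)) xs.length : Nat) : Int)) := by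
  set k := (xs.length+2)/3 with hk
  rw [show PySem.List.pyRange 0 3 1 = [0,1,2] from by decide]
  simp only [List.foldl, pvMat]
  rw [show (min (3*c) xs.length) = (min (3*c+0) xs.length) from by norm_num]
  rw [show (0:Int) = ((0:Nat):Int) from rfl]
  rw [pv_step_fila xs c hc 0 _ (pv_getM _ _ _).1 (fun v => (pv_setM _ _ _ v).1) rfl]
  simp only [List.set_cons_zero]
  rw [show (3*c+0+1) = (3*c+1) from by ring]
  rw [show (1:Int) = ((1:Nat):Int) from rfl]
  rw [pv_step_fila xs c hc 1 _ (pv_getM _ _ _).2.1 (fun v => (pv_setM _ _ _ v).2.1) rfl]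
  simp only [List.set_cons_succ, List.set_cons_zero]
  rw [show (3*c+1+1) = (3*c+2) from by ring]
  rw [show (2:Int) = ((2:Nat):Int) from rfl]
  rw [pv_step_fila xs c hc 2 _ (pv_getM _ _ _).2.2 (fun v => (pv_setM _ _ _ v).2.2) rfl]
  simp only [List.set_cons_succ, List.set_cons_zero]
  rw [show (3*c+2+1) = (3*(c+1)) from by ring]

theorem pv_outer_loop (xs : List String) : ∀ (c : Nat), c ≤ (xs.length+2)/3 →
    (PySem.List.pyRange 0 (c:Int) 1).foldl
      (fun st (columna : Int) => (PySem.List.pyRange 0 3 1).foldl (pvBody xs columna) st)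
      (pvMat xs ((xs.length+2)/3) 0, (0:Int))
    = (pvMat xs ((xs.length+2)/3) c, ((min (3*c) xs.length : Nat) : Int)) := by
  intro c
  induction c with
  | zero => intro _; simp [PySem.List.pyRange_one_eq_nil]
  | succ c ih =>
      intro hle
      rw [show ((c+1 : Nat):Int) = (c:Int)+1 from by push_cast; ring]
      rw [PySem.List.pyRange_one_succ_right (by positivity)]
      rw [List.foldl_append]
      rw [ih (by omega)]
      simp only [List.foldl]
      exact pv_col_step xs c (by omega)

theorem pv_init_mat (xs : List String) (k : Nat) :
    (PySem.List.pyRange 0 3 1).map (fun _ =>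
      (PySem.List.pyRange 0 ((k:Nat):Int) 1).map (fun _ => ("" : String)))
    = pvMat xs k 0 := by
  rw [show PySem.List.pyRange 0 3 1 = [0,1,2] from by decide]
  have hrow : ∀ f : Nat, pvRow xs k f 0 = List.replicate k "" := by
    intro f
    unfold pvRow
    rw [List.eq_replicate_iff]
    refine ⟨by simp, fun b hb => ?_⟩
    obtain ⟨j, _, rfl⟩ := List.mem_map.mp hb
    simp
  have hlhs : (PySem.List.pyRange 0 ((k:Nat):Int) 1).map (fun _ => ("" : String))
      = List.replicate k "" := by
    rw [List.eq_replicate_iff]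
    constructor
    · simp [PySem.List.length_pyRange_one]
    · intro b hb
      obtain ⟨j, _, rfl⟩ := List.mem_map.mp hb
      rfl
  simp [pvMat, hrow, hlhs]

-- A's fold result = pvMat of the code list
theorem pv_reshape (xs : List String) :
    ((PySem.List.pyRange 0 (-(PySem.Int.floordiv (-(xs.length : Int)) 3)) 1).foldl
      (fun st (columna : Int) =>
        (PySem.List.pyRange 0 3 1).foldl (fun st (fila : Int) =>
          if st.2 < (xs.length : Int) then
            (PySem.List.pySetD st.1 fila
               (PySem.List.pySetD (PySem.List.pyGetD st.1 fila []) columna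
                 (PySem.List.pyGetD xs st.2 "")),
             st.2 + 1)
          else st) st)
      ((PySem.List.pyRange 0 3 1).map (fun _ =>
        (PySem.List.pyRange 0 (-(PySem.Int.floordiv (-(xs.length : Int)) 3)) 1).map (fun _ => "")),
       (0 : Int))).1
    = pvMat xs ((xs.length+2)/3) ((xs.length+2)/3) := by
  rw [pv_numcol xs.length]
  set k := (xs.length+2)/3
  have hbody : (fun (st : List (List String) × Int) (columna : Int) =>
      (PySem.List.pyRange 0 3 1).foldl (fun st (fila : Int) =>
        if st.2 < (xs.length : Int) then
          (PySem.List.pySetD st.1 fila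
             (PySem.List.pySetD (PySem.List.pyGetD st.1 fila []) columna
               (PySem.List.pyGetD xs st.2 "")),
           st.2 + 1)
        else st) st)
      = (fun st (columna : Int) => (PySem.List.pyRange 0 3 1).foldl (pvBody xs columna) st) := rfl
  rw [hbody, pv_init_mat xs k, pv_outer_loop xs k (le_refl k)]

-- ---- B side: the round-robin deal ----
def pvAlfa : List Char := "abcdefghijklmnñopqrstuvwxyz ".toList

def pvPush (st : (List String × List String × List String) × Int) (v : String) :
    (List String × List String × List String) × Int :=
  let filas := st.1
  let filas' :=
    if st.2 == 0 then (filas.1 ++ [v], filas.2.1, filas.2.2)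
    else if st.2 == 1 then (filas.1, filas.2.1 ++ [v], filas.2.2)
    else (filas.1, filas.2.1, filas.2.2 ++ [v])
  (filas', PySem.Int.mod (st.2 + 1) 3)

def pvCodes (cs : List Char) : List String :=
  (cs.filter (fun c => pvMapeo.contains c)).map (fun c => pvMapeo.getD c "")

def pvSel (xs : List String) (f : Nat) : List String :=
  (List.range ((xs.length + 2 - f)/3)).map (fun j => xs.getD (3*j+f) "")

-- per-char facts connecting contains/getD with find on the alphabet
theorem pv_singleton_infix (c : Char) (s : List Char) : [c] <:+: s ↔ c ∈ s := by
  constructor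
  · intro h
    exact h.subset (by simp)
  · intro h
    obtain ⟨l, r, rfl⟩ := List.append_of_mem h
    exact ⟨l, r, by simp⟩

theorem pv_contains_iff (c : Char) : pvMapeo.contains c = true ↔ c ∈ pvAlfa := by
  rw [PySem.Dict.contains_iff_mem_keys]
  rw [show pvMapeo.keys = pvAlfa from by decide]

theorem pv_find_nonneg (c : Char) : 0 ≤ PySem.Chars.find pvAlfa [c] ↔ c ∈ pvAlfa := by
  rw [PySem.Chars.find_nonneg_iff, pv_singleton_infix]

set_option maxRecDepth 4000 in
theorem pv_val_find_bool :
    pvAlfa.all (fun c =>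
      PySem.Int.toStr (PySem.Chars.find pvAlfa [c] + 1) == pvMapeo.getD c "") = true := by
  decide

theorem pv_val_find : ∀ c ∈ pvAlfa,
    PySem.Int.toStr (PySem.Chars.find pvAlfa [c] + 1) = pvMapeo.getD c "" := by
  intro c hc
  have := List.all_eq_true.mp pv_val_find_bool c hc
  simpa using this

theorem pv_fold_codes : ∀ (cs : List Char) (st : (List String × List String × List String) × Int),
    cs.foldl
      (fun (st : (List String × List String × List String) × Int) letra =>
        let pos := PySem.Chars.find pvAlfa [letra]
        if 0 ≤ pos then
          let v := PySem.Int.toStr (pos + 1)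
          let filas := st.1
          let filas' :=
            if st.2 == 0 then (filas.1 ++ [v], filas.2.1, filas.2.2)
            else if st.2 == 1 then (filas.1, filas.2.1 ++ [v], filas.2.2)
            else (filas.1, filas.2.1, filas.2.2 ++ [v])
          (filas', PySem.Int.mod (st.2 + 1) 3)
        else st) st
    = (pvCodes cs).foldl pvPush st := by
  intro cs
  induction cs with
  | nil => intro st; simp [pvCodes]
  | cons c t ih =>
      intro st
      by_cases hc : c ∈ pvAlfa
      · have hfind : 0 ≤ PySem.Chars.find pvAlfa [c] := (pv_find_nonneg c).mpr hc
        have hcont : pvMapeo.contains c = true := (pv_contains_iff c).mpr hc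
        simp only [List.foldl_cons, if_pos hfind]
        rw [ih]
        rw [show pvCodes (c :: t) = pvMapeo.getD c "" :: pvCodes t from by
          simp [pvCodes, hcont]]
        rw [List.foldl_cons]
        rw [← pv_val_find c hc]
        rfl
      · have hfind : ¬ 0 ≤ PySem.Chars.find pvAlfa [c] := fun h => hc ((pv_find_nonneg c).mp h)
        have hcont : pvMapeo.contains c = false := by
          rcases Bool.eq_false_or_eq_true (pvMapeo.contains c) with h | h
          · exact absurd ((pv_contains_iff c).mp h) hc
          · exact h
        simp only [List.foldl_cons, if_neg hfind]
        rw [ih]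
        rw [show pvCodes (c :: t) = pvCodes t from by simp [pvCodes, hcont]]

theorem pv_sel_snoc (xs : List String) (x : String) (f : Nat) (hf : f < 3) :
    pvSel (xs ++ [x]) f
      = pvSel xs f ++ (if f = xs.length % 3 then [x] else []) := by
  unfold pvSel
  rw [show (xs ++ [x]).length = xs.length + 1 from by simp]
  by_cases h : f = xs.length % 3
  · rw [if_pos h, show (xs.length + 1 + 2 - f)/3 = (xs.length + 2 - f)/3 + 1 from by omega,
      List.range_succ, List.map_append]
    congr 1
    · refine List.map_congr_left (fun j hj => ?_)
      have hj' := List.mem_range.mp hj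
      rw [List.getD_eq_getElem?_getD, List.getD_eq_getElem?_getD,
        List.getElem?_append_left (by omega)]
    · simp only [List.map_cons, List.map_nil]
      rw [show 3*((xs.length + 2 - f)/3)+f = xs.length from by omega,
        List.getD_eq_getElem?_getD, List.getElem?_append_right (by omega)]
      simp
  · rw [if_neg h, List.append_nil,
      show (xs.length + 1 + 2 - f)/3 = (xs.length + 2 - f)/3 from by omega]
    refine List.map_congr_left (fun j hj => ?_)
    have hj' := List.mem_range.mp hj
    rw [List.getD_eq_getElem?_getD, List.getD_eq_getElem?_getD,
      List.getElem?_append_left (by omega)]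

theorem pv_push_inv (xs : List String) :
    xs.foldl pvPush (([], [], []), (0:Int))
      = ((pvSel xs 0, pvSel xs 1, pvSel xs 2), ((xs.length % 3 : Nat) : Int)) := by
  induction xs using List.reverseRecOn with
  | nil => simp [pvSel]
  | append_singleton xs x ih =>
      rw [List.foldl_append, ih]
      simp only [List.foldl]
      rw [pv_sel_snoc xs x 0 (by omega), pv_sel_snoc xs x 1 (by omega),
        pv_sel_snoc xs x 2 (by omega)]
      have hlen : (xs ++ [x]).length = xs.length + 1 := by simp
      have hmod3 : xs.length % 3 = 0 ∨ xs.length % 3 = 1 ∨ xs.length % 3 = 2 := by omega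
      rcases hmod3 with h | h | h
      · rw [show ((xs.length % 3 : Nat) : Int) = 0 from by rw [h]; rfl,
          show (((xs ++ [x]).length % 3 : Nat) : Int) = 1 from by
            rw [show (xs ++ [x]).length % 3 = 1 from by rw [hlen]; omega]; rfl]
        simp [pvPush, h, PySem.Int.mod]
      · rw [show ((xs.length % 3 : Nat) : Int) = 1 from by rw [h]; rfl,
          show (((xs ++ [x]).length % 3 : Nat) : Int) = 2 from by
            rw [show (xs ++ [x]).length % 3 = 2 from by rw [hlen]; omega]; rfl]
        simp [pvPush, h, PySem.Int.mod]
      · rw [show ((xs.length % 3 : Nat) : Int) = 2 from by rw [h]; rfl,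
          show (((xs ++ [x]).length % 3 : Nat) : Int) = 0 from by
            rw [show (xs ++ [x]).length % 3 = 0 from by rw [hlen]; omega]; rfl]
        simp [pvPush, h, PySem.Int.mod]

theorem pv_sel_pad (xs : List String) (f : Nat) (hf : f < 3) :
    pvSel xs f ++ List.replicate ((xs.length + 2)/3 - (pvSel xs f).length) ""
      = pvRow xs ((xs.length + 2)/3) f ((xs.length + 2)/3) := by
  have hsellen : (pvSel xs f).length = (xs.length + 2 - f)/3 := by simp [pvSel]
  apply List.ext_getElem
  · simp [pvRow, hsellen]; omega
  intro i h1 h2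
  have hik : i < (xs.length + 2)/3 := by simpa [pvRow] using h2
  have hrow : (pvRow xs ((xs.length+2)/3) f ((xs.length+2)/3))[i] = pvCell xs f i := by
    simp [pvRow, hik]
  rw [hrow]
  by_cases hi : i < (xs.length + 2 - f)/3
  · rw [List.getElem_append_left (by rw [hsellen]; omega)]
    simp only [pvSel, List.getElem_map, List.getElem_range]
    have hlt : 3*i+f < xs.length := by omega
    simp [pvCell, hlt]
  · rw [List.getElem_append_right (by rw [hsellen]; omega)]
    rw [List.getElem_replicate]
    have hge : ¬ 3*i+f < xs.length := by omega
    simp [pvCell, hge]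

theorem pv_alt_eq (mensaje : String) :
    reordenar_alt mensaje
      = pvMat (pvCodes (PySem.Str.lower mensaje).toList)
          (((pvCodes (PySem.Str.lower mensaje).toList).length + 2)/3)
          (((pvCodes (PySem.Str.lower mensaje).toList).length + 2)/3) := by
  simp only [reordenar_alt]
  rw [show ("abcdefghijklmnñopqrstuvwxyz " : String).toList = pvAlfa from rfl]
  rw [pv_fold_codes, pv_push_inv]
  set xs := pvCodes (PySem.Str.lower mensaje).toList with hxs
  have h0 : (pvSel xs 0).length = (xs.length + 2)/3 := by simp [pvSel]
  simp only [pvMat]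
  rw [h0]
  rw [show ((xs.length + 2) / 3 - (xs.length + 2) / 3)
        = ((xs.length + 2) / 3 - (pvSel xs 0).length) from by rw [h0]]
  rw [pv_sel_pad xs 0 (by omega), pv_sel_pad xs 1 (by omega), pv_sel_pad xs 2 (by omega)]

-- ===== VERDICT (by name: the statement is the Claim_ definition above) =====
theorem reordenar_spec : Claim_equal_reordenar := by
  unfold Claim_equal_reordenar
  intro mensaje _
  show reordenar mensaje = reordenar_alt mensaje
  rw [pv_alt_eq]
  simp only [reordenar, codificar_mensaje]
  rw [pv_split_join _ (pv_parts_ok (PySem.Str.lower mensaje).toList)]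
  exact pv_reshape _
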